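-- pv_equiv track=rewrite | github.com/lsdudnik/home | поляков_3/23.py | f
-- ===== SOURCE A (Python) =====
-- def f(cur, end, flag):
-- 	if sum([int(x) for x in str(cur)]) == 14:
-- 		flag += 1
-- 	if cur == end and flag == 5:
-- 		return 1
-- 	elif cur > end:
-- 		return 0
-- 	else:
-- 		return f(cur + 2, end, flag) + f(cur * 3, end, flag) + f(cur * 4, end, flag)
-- ===== SOURCE B (Python) =====
-- def f(cur, end, flag):
--     # Bottom-up table DP over (value, hits-still-needed) instead of A's exponential three-way recursion.
--     def ds(n):
--         return sum(int(x) for x in str(n))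
--
--     def hit(c):
--         return 1 if ds(c) == 14 else 0
--
--     if cur > end:
--         return 0
--     R = 5 - flag
--     if R < 0 or R > end - cur + 1:
--         return 0
--     G = {}
--     for i in range(end - cur + 1):
--         c = end - i
--         h = hit(c)
--         for r in range(R + 1):
--             rr = r - h
--             if rr < 0:
--                 v = 0
--             elif c == end:
--                 v = 1 if rr == 0 else 0
--             else:
--                 v = G.get((c + 2, rr), 0) + G.get((c * 3, rr), 0) + G.get((c * 4, rr), 0)
--             G[(c, r)] = v
--     return G[(cur, R)]
-- ===== Notes on version B (the rewrite author's own statement) =====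
-- stated objective: faster
-- what changed: A's exponential three-way recursion (+2, *3, *4) is replaced by a bottom-up dynamic-programming table over (value, hits-still-needed) filled from end_ down to cur, with early zero returns when 5-flag is negative or exceeds the number of values in [cur, end_].
import Mathlib
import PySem

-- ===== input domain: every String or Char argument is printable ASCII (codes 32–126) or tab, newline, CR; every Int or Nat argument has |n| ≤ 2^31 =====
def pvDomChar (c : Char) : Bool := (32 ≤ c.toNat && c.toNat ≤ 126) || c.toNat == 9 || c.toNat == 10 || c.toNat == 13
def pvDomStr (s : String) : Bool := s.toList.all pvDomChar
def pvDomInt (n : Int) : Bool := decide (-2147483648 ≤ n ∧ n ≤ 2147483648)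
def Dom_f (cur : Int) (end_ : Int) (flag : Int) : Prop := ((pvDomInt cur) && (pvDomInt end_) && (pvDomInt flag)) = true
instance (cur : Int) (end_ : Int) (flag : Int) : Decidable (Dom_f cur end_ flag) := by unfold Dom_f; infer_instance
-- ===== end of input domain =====

-- B replaces A's exponential three-way recursion by a bottom-up table DP over (value, hits-still-needed).

-- shared helper: sum([int(x) for x in str(n)]) — exact for n ≥ 0 (for n < 0 Python raises ValueError on '-', outside Pre_f)
def pvDigitSum (n : Int) : Int :=
  ((PySem.Int.toStr n).toList.map (fun ch => (PySem.Int.ofStr? (String.mk [ch])).getD 0)).sum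
def pvHit (c : Int) : Int := if pvDigitSum c = 14 then 1 else 0

-- ===== PORT A =====
def f (cur : Int) (end_ : Int) (flag : Int) : Int :=
  let flag := if pvDigitSum cur = 14 then flag + 1 else flag
  if cur = end_ ∧ flag = 5 then 1
  else if cur > end_ then 0
  else if cur ≤ 0 then 0  -- totality guard only: here Python A raises (cur < 0) or diverges (cur = 0 ≤ end_), both outside Pre_f
  else f (cur + 2) end_ flag + f (cur * 3) end_ flag + f (cur * 4) end_ flag
termination_by (end_ + 2 - cur).toNat
decreasing_by all_goals omega

-- ===== PORT B =====
def f_alt (cur : Int) (end_ : Int) (flag : Int) : Int :=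
  if cur > end_ then 0
  else
    let R := 5 - flag
    if R < 0 ∨ R > end_ - cur + 1 then 0
    else
      let G := (PySem.List.pyRange 0 (end_ - cur + 1) 1).foldl (fun G i =>
        let c := end_ - i
        let h : Int := pvHit c
        (PySem.List.pyRange 0 (R + 1) 1).foldl (fun G r =>
          let rr := r - h
          let v : Int :=
            if rr < 0 then 0
            else if c = end_ then (if rr = 0 then 1 else 0)
            else G.getD (c + 2, rr) 0 + G.getD (c * 3, rr) 0 + G.getD (c * 4, rr) 0
          G.insert (c, r) v) G) PySem.Dict.empty
      G.getD (cur, R) 0  -- Python's G[(cur, R)]: the key is always present here (cur ≤ end_, 0 ≤ R)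


-- ===== PRECONDITION & SPEC =====
-- Pre_f: exactly the inputs on which the Python A returns: A raises ValueError whenever a negative value is
-- reached (str(cur) starts with '-') and recurses forever from cur = 0 when 0 ≤ end_; from cur ≥ 1 it always returns.
def Pre_f (cur : Int) (end_ : Int) (flag : Int) : Prop := 1 ≤ cur ∨ (cur = 0 ∧ end_ < 0)
instance (cur : Int) (end_ : Int) (flag : Int) : Decidable (Pre_f cur end_ flag) := by unfold Pre_f; infer_instance
def pvWitness_f : Int × Int × Int := (1, 5, 0)
def Spec_f (cur : Int) (end_ : Int) (flag : Int) (out : Int) : Prop := out = f_alt cur end_ flag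
instance (cur : Int) (end_ : Int) (flag : Int) (out : Int) : Decidable (Spec_f cur end_ flag out) := by unfold Spec_f; infer_instance

-- ===== CLAIM (what is proved, stated in full; the proofs are below) =====
def Claim_equal_f : Prop := ∀ (cur : Int) (end_ : Int) (flag : Int), Dom_f cur end_ flag → Pre_f cur end_ flag → Spec_f cur end_ flag (f cur end_ flag)

-- ===== LEMMAS AND PROOFS =====

-- gAux end_ c r: the common mathematical core — the number of A-paths from c that reach end_ needing exactly r more digit-sum-14 hits
def gAux (end_ : Int) (c : Int) (r : Int) : Int :=
  let rr := r - pvHit c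
  if c = end_ then (if rr = 0 then 1 else 0)
  else if c > end_ then 0
  else if c ≤ 0 then 0
  else gAux end_ (c + 2) rr + gAux end_ (c * 3) rr + gAux end_ (c * 4) rr
termination_by (end_ - c).toNat
decreasing_by all_goals omega

theorem hbit01 (c : Int) : pvHit c = 0 ∨ pvHit c = 1 := by
  unfold pvHit; split_ifs <;> simp

theorem f_gt (cur end_ flag : Int) (h : end_ < cur) : f cur end_ flag = 0 := by
  rw [f]
  have : ¬ (cur = end_) := by omega
  simp only [this, false_and, if_false]
  split_ifs with h1 <;> first | rfl | omega

theorem gAux_gt (end_ c r : Int) (h : end_ < c) : gAux end_ c r = 0 := by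
  rw [gAux]
  have : ¬ (c = end_) := by omega
  simp only [this, if_false]
  split_ifs with h1 <;> first | rfl | omega

theorem gAux_neg_aux : ∀ (N : Nat) (end_ c r : Int), (end_ - c).toNat ≤ N → r < 0 → gAux end_ c r = 0 := by
  intro N
  induction N with
  | zero =>
    intro end_ c r hN hr
    rw [gAux]
    rcases hbit01 c with h | h <;> rw [h] <;> split_ifs <;> first | rfl | omega
  | succ n ih =>
    intro end_ c r hN hr
    rw [gAux]
    rcases hbit01 c with h | h <;> rw [h] <;> split_ifs <;>
      first
      | rfl
      | omega
      | (rw [ih end_ (c + 2) _ (by omega) (by omega),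
             ih end_ (c * 3) _ (by omega) (by omega),
             ih end_ (c * 4) _ (by omega) (by omega)]; norm_num)

theorem gAux_neg (end_ c r : Int) (hr : r < 0) : gAux end_ c r = 0 :=
  gAux_neg_aux (end_ - c).toNat end_ c r le_rfl hr

theorem gAux_big_aux : ∀ (N : Nat) (end_ c r : Int), (end_ - c).toNat ≤ N → end_ - c + 1 < r → gAux end_ c r = 0 := by
  intro N
  induction N with
  | zero =>
    intro end_ c r hN hr
    rw [gAux]
    rcases hbit01 c with h | h <;> rw [h] <;> split_ifs <;> first | rfl | omega
  | succ n ih =>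
    intro end_ c r hN hr
    rw [gAux]
    rcases hbit01 c with h | h <;> rw [h] <;> split_ifs <;>
      first
      | rfl
      | omega
      | (rw [ih end_ (c + 2) _ (by omega) (by omega),
             ih end_ (c * 3) _ (by omega) (by omega),
             ih end_ (c * 4) _ (by omega) (by omega)]; norm_num)

theorem gAux_big (end_ c r : Int) (hr : end_ - c + 1 < r) : gAux end_ c r = 0 :=
  gAux_big_aux (end_ - c).toNat end_ c r le_rfl hr

theorem f_eq_gAux_aux : ∀ (N : Nat) (end_ cur flag : Int), (end_ + 2 - cur).toNat ≤ N → 1 ≤ cur →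
    f cur end_ flag = gAux end_ cur (5 - flag) := by
  intro N
  induction N with
  | zero =>
    intro end_ cur flag hN h1
    rw [f_gt _ _ _ (by omega), gAux_gt _ _ _ (by omega)]
  | succ n ih =>
    intro end_ cur flag hN h1
    rw [f, gAux]
    by_cases hd : pvDigitSum cur = 14 <;>
      simp only [pvHit, hd, if_true, if_false] <;>
    split_ifs <;>
      first
      | rfl
      | omega
      | (rw [f_gt _ _ _ (by omega), f_gt _ _ _ (by omega), f_gt _ _ _ (by omega)]; norm_num)
      | (rw [ih end_ (cur + 2) _ (by omega) (by omega),
             ih end_ (cur * 3) _ (by omega) (by omega),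
             ih end_ (cur * 4) _ (by omega) (by omega)]; ring_nf)

theorem f_eq_gAux (end_ cur flag : Int) (h1 : 1 ≤ cur) :
    f cur end_ flag = gAux end_ cur (5 - flag) :=
  f_eq_gAux_aux (end_ + 2 - cur).toNat end_ cur flag le_rfl h1

theorem gAux_rr_neg (end_ c r : Int) (h : r - pvHit c < 0) : gAux end_ c r = 0 := by
  rw [gAux]
  rcases hbit01 c with hb | hb <;> rw [hb] at h ⊢ <;> split_ifs <;>
    first
    | rfl
    | omega
    | (rw [gAux_neg _ _ _ (by omega), gAux_neg _ _ _ (by omega), gAux_neg _ _ _ (by omega)]; norm_num)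

theorem gAux_at_end (end_ r : Int) :
    gAux end_ end_ r = if r - pvHit end_ = 0 then 1 else 0 := by
  rw [gAux, if_pos rfl]

theorem gAux_rec (end_ c r : Int) (hc1 : 1 ≤ c) (hc2 : c < end_) :
    gAux end_ c r =
      gAux end_ (c + 2) (r - pvHit c) + gAux end_ (c * 3) (r - pvHit c) +
        gAux end_ (c * 4) (r - pvHit c) := by
  rw [gAux, if_neg (by omega), if_neg (by omega), if_neg (by omega)]

theorem entry_eq (end_ flag c m : Int) (hc1 : 1 ≤ c) (hc2 : c ≤ end_) (hm0 : 0 ≤ m)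
    (hmR : m ≤ 5 - flag) (G' : PySem.Dict (Int × Int) Int)
    (hG' : ∀ c' r : Int, G'.getD (c', r) 0 =
      if (c + 1 ≤ c' ∧ c' ≤ end_ ∧ 0 ≤ r ∧ r ≤ 5 - flag) ∨ (c' = c ∧ 0 ≤ r ∧ r < m)
      then gAux end_ c' r else 0) :
    (if m - pvHit c < 0 then 0
     else if c = end_ then (if m - pvHit c = 0 then 1 else 0)
     else G'.getD (c + 2, m - pvHit c) 0 + G'.getD (c * 3, m - pvHit c) 0 +
          G'.getD (c * 4, m - pvHit c) 0)
    = gAux end_ c m := by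
  by_cases hneg : m - pvHit c < 0
  · rw [if_pos hneg, gAux_rr_neg end_ c m hneg]
  · rw [if_neg hneg]
    by_cases hce : c = end_
    · subst hce
      rw [if_pos rfl, gAux_at_end]
    · rw [if_neg hce, hG' (c + 2), hG' (c * 3), hG' (c * 4),
          gAux_rec end_ c m hc1 (by omega)]
      have key : ∀ c'' : Int, c + 1 ≤ c'' →
          (if (c + 1 ≤ c'' ∧ c'' ≤ end_ ∧ 0 ≤ m - pvHit c ∧ m - pvHit c ≤ 5 - flag) ∨
              (c'' = c ∧ 0 ≤ m - pvHit c ∧ m - pvHit c < m)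
           then gAux end_ c'' (m - pvHit c) else 0) = gAux end_ c'' (m - pvHit c) := by
        intro c'' hlow
        rcases hbit01 c with hb | hb <;> rw [hb] at hneg ⊢ <;>
        · by_cases hhi : c'' ≤ end_
          · rw [if_pos (Or.inl ⟨hlow, hhi, by omega, by omega⟩)]
          · rw [if_neg (by omega), gAux_gt _ _ _ (by omega)]
      rw [key (c + 2) (by omega), key (c * 3) (by omega), key (c * 4) (by omega)]

theorem innerInv (end_ flag c : Int) (hc1 : 1 ≤ c) (hc2 : c ≤ end_)
    (G : PySem.Dict (Int × Int) Int)
    (hG : ∀ c' r : Int, G.getD (c', r) 0 =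
      if c + 1 ≤ c' ∧ c' ≤ end_ ∧ 0 ≤ r ∧ r ≤ 5 - flag then gAux end_ c' r else 0) :
    ∀ (m : Nat), (m : Int) ≤ 5 - flag + 1 →
      ∀ c' r : Int,
        (List.foldl
          (fun G r =>
            G.insert (c, r)
              (if r - pvHit c < 0 then 0
               else
                 if c = end_ then if r - pvHit c = 0 then 1 else 0
                 else
                   G.getD (c + 2, r - pvHit c) 0 + G.getD (c * 3, r - pvHit c) 0 +
                     G.getD (c * 4, r - pvHit c) 0))
          G (PySem.List.pyRange 0 (m : Int) 1)).getD (c', r) 0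
        = if (c + 1 ≤ c' ∧ c' ≤ end_ ∧ 0 ≤ r ∧ r ≤ 5 - flag) ∨ (c' = c ∧ 0 ≤ r ∧ r < (m : Int))
          then gAux end_ c' r else 0 := by
  intro m
  induction m with
  | zero =>
    intro hm c' r
    rw [Nat.cast_zero, PySem.List.pyRange_one_eq_nil (by omega), List.foldl_nil, hG c' r]
    by_cases hbox : c + 1 ≤ c' ∧ c' ≤ end_ ∧ 0 ≤ r ∧ r ≤ 5 - flag
    · rw [if_pos hbox, if_pos (Or.inl hbox)]
    · rw [if_neg hbox, if_neg (by omega)]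
  | succ m ih =>
    intro hm c' r
    have h0m : ((m + 1 : Nat) : Int) = (m : Int) + 1 := by push_cast; ring
    rw [h0m, PySem.List.pyRange_one_succ_right (by positivity), List.foldl_append,
        List.foldl_cons, List.foldl_nil, PySem.Dict.getD_insert]
    by_cases hk : (c', r) = (c, (m : Int))
    · have hc' : c' = c := (Prod.ext_iff.mp hk).1
      have hr : r = (m : Int) := (Prod.ext_iff.mp hk).2
      rw [if_pos hk, hc', hr, if_pos (Or.inr ⟨rfl, by positivity, by omega⟩)]
      exact entry_eq end_ flag c (m : Int) hc1 hc2 (by positivity) (by omega) _ (ih (by omega))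
    · rw [if_neg hk, ih (by omega) c' r]
      have hpair : ¬(c' = c ∧ r = (m : Int)) := by simpa [Prod.ext_iff] using hk
      by_cases hcond : (c + 1 ≤ c' ∧ c' ≤ end_ ∧ 0 ≤ r ∧ r ≤ 5 - flag) ∨
          (c' = c ∧ 0 ≤ r ∧ r < (m : Int))
      · rw [if_pos hcond, if_pos (by omega)]
      · rw [if_neg hcond, if_neg (by omega)]

theorem outerInv (end_ flag cur : Int) (h1 : 1 ≤ cur) (h2 : cur ≤ end_) (hR0 : 0 ≤ 5 - flag) :
    ∀ (k : Nat), (k : Int) ≤ end_ - cur + 1 →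
      ∀ c' r : Int,
        (List.foldl
          (fun G i =>
            List.foldl
              (fun G r =>
                G.insert (end_ - i, r)
                  (if r - pvHit (end_ - i) < 0 then 0
                   else
                     if end_ - i = end_ then if r - pvHit (end_ - i) = 0 then 1 else 0
                     else
                       G.getD (end_ - i + 2, r - pvHit (end_ - i)) 0 +
                           G.getD ((end_ - i) * 3, r - pvHit (end_ - i)) 0 +
                         G.getD ((end_ - i) * 4, r - pvHit (end_ - i)) 0))
              G (PySem.List.pyRange 0 (5 - flag + 1) 1))
          PySem.Dict.empty (PySem.List.pyRange 0 (k : Int) 1)).getD (c', r) 0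
        = if end_ - (k : Int) + 1 ≤ c' ∧ c' ≤ end_ ∧ 0 ≤ r ∧ r ≤ 5 - flag
          then gAux end_ c' r else 0 := by
  intro k
  induction k with
  | zero =>
    intro hk c' r
    rw [Nat.cast_zero, PySem.List.pyRange_one_eq_nil (a := 0) (b := 0) (by omega),
        List.foldl_nil, PySem.Dict.getD_empty, if_neg (by omega)]
  | succ k ih =>
    intro hk c' r
    have h0k : ((k + 1 : Nat) : Int) = (k : Int) + 1 := by push_cast; ring
    rw [h0k, PySem.List.pyRange_one_succ_right (a := 0) (b := (k : Int)) (by positivity),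
        List.foldl_append, List.foldl_cons, List.foldl_nil]
    have hmid := innerInv end_ flag (end_ - (k : Int)) (by omega) (by omega) _ (ih (by omega))
      (5 - flag + 1).toNat (by omega) c' r
    have hcast : (((5 - flag + 1).toNat : Int)) = 5 - flag + 1 := by omega
    rw [hcast] at hmid
    rw [hmid]
    by_cases hbox : end_ - ((k : Int) + 1) + 1 ≤ c' ∧ c' ≤ end_ ∧ 0 ≤ r ∧ r ≤ 5 - flag
    · rw [if_pos (by omega), if_pos hbox]
    · rw [if_neg (by omega), if_neg hbox]

theorem f_spec_main (cur end_ flag : Int) (h1 : 1 ≤ cur) (h2 : cur ≤ end_)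
    (hR0 : 0 ≤ 5 - flag) (hR1 : 5 - flag ≤ end_ - cur + 1) :
    f_alt cur end_ flag = gAux end_ cur (5 - flag) := by
  unfold f_alt
  rw [if_neg (by omega), if_neg (by omega)]
  have hmain := outerInv end_ flag cur h1 h2 hR0 (end_ - cur + 1).toNat (by omega) cur (5 - flag)
  have hcast : (((end_ - cur + 1).toNat : Int)) = end_ - cur + 1 := by omega
  rw [hcast] at hmain
  rw [hmain, if_pos (by omega)]

-- ===== VERDICT (by name: the statement is the Claim_ definition above) =====
theorem f_spec : Claim_equal_f := by
  intro cur end_ flag _ hpre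
  unfold Spec_f
  rcases hpre with h1 | ⟨h0, hneg⟩
  · by_cases hgt : end_ < cur
    · rw [f_gt _ _ _ hgt]
      unfold f_alt
      rw [if_pos (by omega)]
    · by_cases hR0 : 5 - flag < 0
      · rw [f_eq_gAux _ _ _ h1, gAux_neg _ _ _ hR0]
        unfold f_alt
        rw [if_neg (by omega), if_pos (by omega)]
      · by_cases hR1 : end_ - cur + 1 < 5 - flag
        · rw [f_eq_gAux _ _ _ h1, gAux_big _ _ _ hR1]
          unfold f_alt
          rw [if_neg (by omega), if_pos (by omega)]
        · rw [f_eq_gAux _ _ _ h1, f_spec_main cur end_ flag h1 (by omega) (by omega) (by omega)]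
  · rw [f_gt _ _ _ (by omega)]
    unfold f_alt
    rw [if_pos (by omega)]
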